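-- pv_equiv track=rewrite | github.com/zenone/crate | crate/core/conflict_resolution.py | compare_key_values
-- ===== SOURCE A (Python) =====
-- from typing import Any, Dict, Optional
--
-- def compare_key_values(key1: str, key2: str) -> Dict[str, Any]:
--     """
--     Compare two musical key values.
--
--     Args:
--         key1: First key value
--         key2: Second key value
--
--     Returns:
--         Dictionary with comparison results
--
--     Examples:
--         >>> compare_key_values("C maj", "C min")
--         {'matches': False, 'enharmonic': False}
--     """
--     # Normalize for comparison
--     k1 = key1.lower().strip()
--     k2 = key2.lower().strip()
--
--     # Direct match
--     if k1 == k2: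
--         return {"matches": True, "enharmonic": False}
--
--     # Check for enharmonic equivalents
--     enharmonic_map = {
--         "c#": "db", "d#": "eb", "f#": "gb",
--         "g#": "ab", "a#": "bb"
--     }
--
--     # Extract pitch and modifier
--     parts1 = k1.split()
--     parts2 = k2.split()
--
--     if len(parts1) >= 1 and len(parts2) >= 1:
--         pitch1 = parts1[0]
--         pitch2 = parts2[0]
--
--         # Check if enharmonic
--         for sharp, flat in enharmonic_map.items():
--             if (pitch1 == sharp and pitch2 == flat) or (pitch1 == flat and pitch2 == sharp):
--                 # Same modifier?
--                 mod1 = parts1[1] if len(parts1) > 1 else "maj"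
--                 mod2 = parts2[1] if len(parts2) > 1 else "maj"
--                 if mod1 == mod2:
--                     return {"matches": True, "enharmonic": True}
--
--     return {"matches": False, "enharmonic": False}
-- ===== SOURCE B (Python) =====
-- # B: canonicalize each key once (normalized string, pitch, flat-canonical pitch, modifier)
-- # and compare the canonical forms, instead of A's pairwise sharp/flat loop.
-- from typing import Any, Dict, Optional, Tuple
--
-- _CANON = {"c#": "db", "d#": "eb", "f#": "gb", "g#": "ab", "a#": "bb"}
--
--
-- def _canonical(key: str) -> Tuple[str, Optional[Tuple[str, str, str]]]:
--     """Normalized string plus (pitch, flat-canonical pitch, modifier), if any."""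
--     k = key.lower().strip()
--     tokens = k.split()
--     if not tokens:
--         return k, None
--     pitch = tokens[0]
--     mod = tokens[1] if len(tokens) > 1 else "maj"
--     return k, (pitch, _CANON.get(pitch, pitch), mod)
--
--
-- def compare_key_values(key1: str, key2: str) -> Dict[str, Any]:
--     k1, c1 = _canonical(key1)
--     k2, c2 = _canonical(key2)
--     if k1 == k2:
--         return {"matches": True, "enharmonic": False}
--     if c1 is not None and c2 is not None:
--         p1, canon1, m1 = c1
--         p2, canon2, m2 = c2
--         if canon1 == canon2 and p1 != p2 and m1 == m2:
--             return {"matches": True, "enharmonic": True}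
--     return {"matches": False, "enharmonic": False}
-- ===== Notes on version B (the rewrite author's own statement) =====
-- stated objective: alternative
-- what changed: B canonicalizes each key independently into (pitch, flat-canonical pitch via one map lookup, modifier) and compares the two canonical forms, instead of A's loop over the five sharp/flat pairs testing both directions pairwise.
import Mathlib
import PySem

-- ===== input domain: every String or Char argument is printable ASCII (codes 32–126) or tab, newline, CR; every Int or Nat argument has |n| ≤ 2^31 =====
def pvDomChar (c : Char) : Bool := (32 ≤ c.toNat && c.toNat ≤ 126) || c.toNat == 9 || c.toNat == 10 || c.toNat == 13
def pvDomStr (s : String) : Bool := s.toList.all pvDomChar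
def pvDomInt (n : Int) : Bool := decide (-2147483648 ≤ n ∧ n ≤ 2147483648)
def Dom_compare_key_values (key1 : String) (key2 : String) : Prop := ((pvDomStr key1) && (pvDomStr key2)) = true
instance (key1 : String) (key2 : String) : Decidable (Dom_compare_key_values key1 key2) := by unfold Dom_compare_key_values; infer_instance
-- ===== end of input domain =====

-- B canonicalizes each key once (pitch mapped to its flat form by one lookup, plus modifier)
-- and compares the two canonical forms, replacing A's pairwise sharp/flat loop (objective: alternative decomposition).

set_option maxRecDepth 8192

-- ===== PORT A =====
-- enharmonic_map.items() as the literal list of pairs A's loop iterates over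
def pvEnharmonicPairs : List (String × String) :=
  [("c#", "db"), ("d#", "eb"), ("f#", "gb"), ("g#", "ab"), ("a#", "bb")]

-- the 'for sharp, flat in enharmonic_map.items():' loop: return on first pair whose pitch test
-- and modifier test both pass, otherwise fall through to the next pair
def pvLoopA (p1 p2 m1 m2 : String) : List (String × String) → Bool
  | [] => false
  | (sharp, flat) :: rest =>
      if (p1 == sharp && p2 == flat) || (p1 == flat && p2 == sharp) then
        if m1 == m2 then true else pvLoopA p1 p2 m1 m2 rest
      else pvLoopA p1 p2 m1 m2 rest

def compare_key_values (key1 : String) (key2 : String) : List (String × Bool) :=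
  let k1 := PySem.Str.strip (PySem.Str.lower key1)
  let k2 := PySem.Str.strip (PySem.Str.lower key2)
  if k1 == k2 then [("matches", true), ("enharmonic", false)]
  else
    let parts1 := PySem.Str.split₀ k1
    let parts2 := PySem.Str.split₀ k2
    match parts1, parts2 with
    | p1 :: rest1, p2 :: rest2 =>
        -- mod1/mod2 = parts[1] if len(parts) > 1 else "maj"
        if pvLoopA p1 p2 (rest1.headD "maj") (rest2.headD "maj") pvEnharmonicPairs then
          [("matches", true), ("enharmonic", true)]
        else [("matches", false), ("enharmonic", false)]
    | _, _ => [("matches", false), ("enharmonic", false)]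

-- ===== PORT B =====
def pvCanonDict : PySem.Dict String String :=
  PySem.Dict.ofList [("c#", "db"), ("d#", "eb"), ("f#", "gb"), ("g#", "ab"), ("a#", "bb")]

-- _canonical: normalized string plus (pitch, flat-canonical pitch, modifier), if any token exists
def pvCanonical (key : String) : String × Option (String × String × String) :=
  let k := PySem.Str.strip (PySem.Str.lower key)
  match PySem.Str.split₀ k with
  | [] => (k, none)
  | pitch :: rest => (k, some (pitch, pvCanonDict.getD pitch pitch, rest.headD "maj"))

def compare_key_values_alt (key1 : String) (key2 : String) : List (String × Bool) :=
  let r1 := pvCanonical key1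
  let r2 := pvCanonical key2
  if r1.1 == r2.1 then [("matches", true), ("enharmonic", false)]
  else
    match r1.2, r2.2 with
    | some (p1, c1, m1), some (p2, c2, m2) =>
        if c1 == c2 && p1 != p2 && m1 == m2 then [("matches", true), ("enharmonic", true)]
        else [("matches", false), ("enharmonic", false)]
    | _, _ => [("matches", false), ("enharmonic", false)]

-- ===== PRECONDITION & SPEC =====
def Spec_compare_key_values (key1 : String) (key2 : String) (out : List (String × Bool)) : Prop := out = compare_key_values_alt key1 key2
instance (key1 : String) (key2 : String) (out : List (String × Bool)) : Decidable (Spec_compare_key_values key1 key2 out) := by unfold Spec_compare_key_values; infer_instance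

-- ===== CLAIM (what is proved, stated in full; the proofs are below) =====
def Claim_equal_compare_key_values : Prop := ∀ (key1 : String) (key2 : String), Dom_compare_key_values key1 key2 → Spec_compare_key_values key1 key2 (compare_key_values key1 key2)

-- ===== LEMMAS AND PROOFS =====

-- the flat-canonical pitch of B's dict lookup, as an explicit if-chain (proof helper)
def canonIf (p : String) : String :=
  if p = "c#" then "db" else if p = "d#" then "eb" else if p = "f#" then "gb"
  else if p = "g#" then "ab" else if p = "a#" then "bb" else p

lemma pvCanonDict_getD (p : String) : pvCanonDict.getD p p = canonIf p := by
  unfold canonIf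
  rcases eq_or_ne p "c#" with h1 | h1
  · subst h1; decide
  rcases eq_or_ne p "d#" with h2 | h2
  · subst h2; decide
  rcases eq_or_ne p "f#" with h3 | h3
  · subst h3; decide
  rcases eq_or_ne p "g#" with h4 | h4
  · subst h4; decide
  rcases eq_or_ne p "a#" with h5 | h5
  · subst h5; decide
  rw [if_neg h1, if_neg h2, if_neg h3, if_neg h4, if_neg h5]
  have h : pvCanonDict = PySem.Dict.mk [("c#", "db"), ("d#", "eb"), ("f#", "gb"), ("g#", "ab"), ("a#", "bb")] := by rfl
  rw [h]
  simp only [PySem.Dict.getD, PySem.Dict.get?_mk_cons, beq_iff_eq]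
  rw [if_neg (Ne.symm h1), if_neg (Ne.symm h2), if_neg (Ne.symm h3), if_neg (Ne.symm h4), if_neg (Ne.symm h5)]
  rfl

lemma pvLoopA_eq_canonIf (p1 p2 m1 m2 : String) :
    pvLoopA p1 p2 m1 m2 pvEnharmonicPairs =
      ((canonIf p1 == canonIf p2) && (p1 != p2) && (m1 == m2)) := by
  by_cases hm : m1 = m2
  · subst hm
    simp only [pvLoopA, pvEnharmonicPairs, beq_self_eq_true, if_true, Bool.and_true]
    rcases eq_or_ne p1 "c#" with h0 | h0
    · subst h0
      rcases eq_or_ne p2 "db" with g | g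
      · subst g; decide
      rcases eq_or_ne p2 "c#" with g0 | g0
      · subst g0; decide
      rcases eq_or_ne p2 "d#" with g1 | g1
      · subst g1; decide
      rcases eq_or_ne p2 "f#" with g2 | g2
      · subst g2; decide
      rcases eq_or_ne p2 "g#" with g3 | g3
      · subst g3; decide
      rcases eq_or_ne p2 "a#" with g4 | g4
      · subst g4; decide
      simp [canonIf, g, g0, g1, g2, g3, g4]
      intro e; exact absurd e.symm g
    rcases eq_or_ne p1 "d#" with h1 | h1
    · subst h1
      rcases eq_or_ne p2 "eb" with g | g
      · subst g; decide
      rcases eq_or_ne p2 "c#" with g0 | g0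
      · subst g0; decide
      rcases eq_or_ne p2 "d#" with g1 | g1
      · subst g1; decide
      rcases eq_or_ne p2 "f#" with g2 | g2
      · subst g2; decide
      rcases eq_or_ne p2 "g#" with g3 | g3
      · subst g3; decide
      rcases eq_or_ne p2 "a#" with g4 | g4
      · subst g4; decide
      simp [canonIf, g, g0, g1, g2, g3, g4]
      intro e; exact absurd e.symm g
    rcases eq_or_ne p1 "f#" with h2 | h2
    · subst h2
      rcases eq_or_ne p2 "gb" with g | g
      · subst g; decide
      rcases eq_or_ne p2 "c#" with g0 | g0
      · subst g0; decide
      rcases eq_or_ne p2 "d#" with g1 | g1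
      · subst g1; decide
      rcases eq_or_ne p2 "f#" with g2 | g2
      · subst g2; decide
      rcases eq_or_ne p2 "g#" with g3 | g3
      · subst g3; decide
      rcases eq_or_ne p2 "a#" with g4 | g4
      · subst g4; decide
      simp [canonIf, g, g0, g1, g2, g3, g4]
      intro e; exact absurd e.symm g
    rcases eq_or_ne p1 "g#" with h3 | h3
    · subst h3
      rcases eq_or_ne p2 "ab" with g | g
      · subst g; decide
      rcases eq_or_ne p2 "c#" with g0 | g0
      · subst g0; decide
      rcases eq_or_ne p2 "d#" with g1 | g1
      · subst g1; decide
      rcases eq_or_ne p2 "f#" with g2 | g2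
      · subst g2; decide
      rcases eq_or_ne p2 "g#" with g3 | g3
      · subst g3; decide
      rcases eq_or_ne p2 "a#" with g4 | g4
      · subst g4; decide
      simp [canonIf, g, g0, g1, g2, g3, g4]
      intro e; exact absurd e.symm g
    rcases eq_or_ne p1 "a#" with h4 | h4
    · subst h4
      rcases eq_or_ne p2 "bb" with g | g
      · subst g; decide
      rcases eq_or_ne p2 "c#" with g0 | g0
      · subst g0; decide
      rcases eq_or_ne p2 "d#" with g1 | g1
      · subst g1; decide
      rcases eq_or_ne p2 "f#" with g2 | g2
      · subst g2; decide
      rcases eq_or_ne p2 "g#" with g3 | g3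
      · subst g3; decide
      rcases eq_or_ne p2 "a#" with g4 | g4
      · subst g4; decide
      simp [canonIf, g, g0, g1, g2, g3, g4]
      intro e; exact absurd e.symm g
    rcases eq_or_ne p2 "c#" with g0 | g0
    · subst g0
      have hb : (p1 != "c#") = true := by simp [h0]
      simp [canonIf, h0, h1, h2, h3, h4, hb]
      rcases eq_or_ne p1 "db" with d | d <;> simp [d]
    rcases eq_or_ne p2 "d#" with g1 | g1
    · subst g1
      have hb : (p1 != "d#") = true := by simp [h1]
      simp [canonIf, h0, h1, h2, h3, h4, hb]
      rcases eq_or_ne p1 "eb" with d | d <;> simp [d]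
    rcases eq_or_ne p2 "f#" with g2 | g2
    · subst g2
      have hb : (p1 != "f#") = true := by simp [h2]
      simp [canonIf, h0, h1, h2, h3, h4, hb]
      rcases eq_or_ne p1 "gb" with d | d <;> simp [d]
    rcases eq_or_ne p2 "g#" with g3 | g3
    · subst g3
      have hb : (p1 != "g#") = true := by simp [h3]
      simp [canonIf, h0, h1, h2, h3, h4, hb]
      rcases eq_or_ne p1 "ab" with d | d <;> simp [d]
    rcases eq_or_ne p2 "a#" with g4 | g4
    · subst g4
      have hb : (p1 != "a#") = true := by simp [h4]
      simp [canonIf, h0, h1, h2, h3, h4, hb]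
      rcases eq_or_ne p1 "bb" with d | d <;> simp [d]
    rcases eq_or_ne p1 p2 with e | e
    · subst e; simp [canonIf, g0, g1, g2, g3, g4]
    · have hb : (p1 != p2) = true := by simp [e]
      simp [canonIf, h0, h1, h2, h3, h4, g0, g1, g2, g3, g4, hb]
      intro e2; exact absurd e2 e
  · have hmb : (m1 == m2) = false := by simp [hm]
    simp [pvLoopA, pvEnharmonicPairs, hmb]

-- A's loop over the five sharp/flat pairs computes B's canonical-form test
lemma pvLoopA_eq_canon (p1 p2 m1 m2 : String) :
    pvLoopA p1 p2 m1 m2 pvEnharmonicPairs =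
      ((pvCanonDict.getD p1 p1 == pvCanonDict.getD p2 p2) && (p1 != p2) && (m1 == m2)) := by
  rw [pvCanonDict_getD p1, pvCanonDict_getD p2, pvLoopA_eq_canonIf]

-- ===== VERDICT (by name: the statement is the Claim_ definition above) =====
theorem compare_key_values_spec : Claim_equal_compare_key_values := by
  intro key1 key2 _
  unfold Spec_compare_key_values compare_key_values compare_key_values_alt pvCanonical
  generalize PySem.Str.strip (PySem.Str.lower key1) = k1
  generalize PySem.Str.strip (PySem.Str.lower key2) = k2
  by_cases he : k1 = k2
  · subst he; simp
  · have heb : (k1 == k2) = false := by simp [he]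
    simp only [heb, Bool.false_eq_true, if_false]
    rcases h1 : PySem.Str.split₀ k1 with _ | ⟨p1, rest1⟩ <;>
    rcases h2 : PySem.Str.split₀ k2 with _ | ⟨p2, rest2⟩ <;>
    simp only [pvLoopA_eq_canon, heb, Bool.false_eq_true, if_false]
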